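-- pv_equiv track=rewrite | github.com/oguzhankir/omnichunk | src/omnichunk/engine/prose_engine.py | _filter_empty_ranges
-- ===== SOURCE A (Python) =====
-- def _filter_empty_ranges(
--     content: str,
--     ranges: list[tuple[int, int, list[str], str]],
-- ) -> list[tuple[int, int, list[str], str]]:
--     out: list[tuple[int, int, list[str], str]] = []
--     for start, end, hierarchy, section_type in ranges:
--         if end <= start:
--             continue
--         if not content[start:end].strip():
--             if out:
--                 ps, pe, ph, pt = out[-1]
--                 out[-1] = (ps, end, ph, pt)
--             continue
--         out.append((start, end, hierarchy, section_type))
--     return out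
-- ===== SOURCE B (Python) =====
-- def _filter_empty_ranges(
--     content: str,
--     ranges: list[tuple[int, int, list[str], str]],
-- ) -> list[tuple[int, int, list[str], str]]:
--     # Stage 1: drop degenerate ranges and tag each survivor as blank/content.
--     tagged = [(r, not content[r[0]:r[1]].strip())
--               for r in ranges if r[1] > r[0]]
--     # Stage 2: emit each content range, extending its end over the run of
--     # blank ranges that immediately follows it; leading blanks are dropped.
--     out = []
--     i, n = 0, len(tagged)
--     while i < n:
--         (s, e, h, t), blank = tagged[i]
--         i += 1
--         if blank:
--             continue
--         new_end = e
--         while i < n and tagged[i][1]: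
--             new_end = tagged[i][0][1]
--             i += 1
--         out.append((s, new_end, h, t))
--     return out
-- ===== Notes on version B (the rewrite author's own statement) =====
-- stated objective: alternative
-- what changed: Replaces A's single fold that patches out[-1] on every blank range with a two-stage algorithm: a tag-and-filter pass over the ranges, then a grouping pass that emits each content range with its end extended over the run of blank-tagged ranges that follows it.
import Mathlib
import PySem

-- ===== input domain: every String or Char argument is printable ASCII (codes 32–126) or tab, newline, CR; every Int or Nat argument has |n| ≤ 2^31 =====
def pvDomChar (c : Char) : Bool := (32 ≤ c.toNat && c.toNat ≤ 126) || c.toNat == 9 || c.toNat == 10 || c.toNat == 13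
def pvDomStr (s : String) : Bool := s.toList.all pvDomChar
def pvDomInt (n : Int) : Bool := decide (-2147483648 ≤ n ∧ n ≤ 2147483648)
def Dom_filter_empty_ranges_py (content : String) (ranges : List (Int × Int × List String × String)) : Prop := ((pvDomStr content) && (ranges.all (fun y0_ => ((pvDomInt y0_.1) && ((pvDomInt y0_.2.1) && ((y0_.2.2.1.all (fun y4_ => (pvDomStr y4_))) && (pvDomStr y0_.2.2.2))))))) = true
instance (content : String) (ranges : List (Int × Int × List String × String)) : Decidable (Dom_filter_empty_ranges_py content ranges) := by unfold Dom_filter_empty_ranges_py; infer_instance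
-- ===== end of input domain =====

-- B replaces A's single fold that patches out[-1] on every blank range with a two-stage
-- algorithm: a tag-and-filter pass, then a grouping pass that extends each content range
-- over the run of blank ranges following it (objective: alternative).

-- ===== PORT A =====
-- 'not content[start:end].strip()' — shared by both Pythons verbatim
def pvBlank (content : String) (s e : Int) : Bool :=
  PySem.Str.strip (PySem.Str.slice content (some s) (some e)) == ""

-- one iteration of A's loop body
def pvStepA (content : String) (out : List (Int × Int × List String × String))
    (r : Int × Int × List String × String) : List (Int × Int × List String × String) :=
  let (s, e, h, t) := r
  if e ≤ s then out
  else if pvBlank content s e then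
    match out.getLast? with          -- 'if out: ps, pe, ph, pt = out[-1]; out[-1] = (ps, e, ph, pt)'
    | some (ps, _, ph, pt) => out.dropLast ++ [(ps, e, ph, pt)]
    | none => out
  else out ++ [(s, e, h, t)]

def filter_empty_ranges_py (content : String) (ranges : List (Int × Int × List String × String)) : List (Int × Int × List String × String) :=
  ranges.foldl (pvStepA content) []

-- ===== PORT B =====
-- Stage 1 of Source B: '[(r, not content[r[0]:r[1]].strip()) for r in ranges if r[1] > r[0]]'
def pvTagFilter (content : String) (ranges : List (Int × Int × List String × String)) :
    List ((Int × Int × List String × String) × Bool) :=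
  ranges.filterMap (fun r =>
    if r.2.1 ≤ r.1 then none else some (r, pvBlank content r.1 r.2.1))

-- Source B's inner while loop: consume the leading run of blank-tagged ranges,
-- returning the last blank's end (or the given default) and the rest
def pvTakeBlanks (e : Int) :
    List ((Int × Int × List String × String) × Bool) →
      Int × List ((Int × Int × List String × String) × Bool)
  | [] => (e, [])
  | (r, b) :: tl => if b then pvTakeBlanks r.2.1 tl else (e, (r, b) :: tl)

theorem pvTakeBlanks_len (e : Int) (l : List ((Int × Int × List String × String) × Bool)) :
    (pvTakeBlanks e l).2.length ≤ l.length := by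
  induction l generalizing e with
  | nil => simp [pvTakeBlanks]
  | cons x tl ih =>
    obtain ⟨r, b⟩ := x
    by_cases hb : b = true <;> simp [pvTakeBlanks, hb]
    · exact Nat.le_succ_of_le (ih _)

-- Source B's outer while loop: skip blank heads, emit each content head with its run's end
def pvEmit : List ((Int × Int × List String × String) × Bool) → List (Int × Int × List String × String)
  | [] => []
  | ((s, e, h, t), b) :: tl =>
    if b then pvEmit tl
    else
      let p := pvTakeBlanks e tl
      (s, p.1, h, t) :: pvEmit p.2
termination_by l => l.length
decreasing_by
  · simp
  · simpa using Nat.lt_succ_of_le (pvTakeBlanks_len e tl)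

def filter_empty_ranges_py_alt (content : String) (ranges : List (Int × Int × List String × String)) : List (Int × Int × List String × String) :=
  pvEmit (pvTagFilter content ranges)

-- ===== PRECONDITION & SPEC =====
def Spec_filter_empty_ranges_py (content : String) (ranges : List (Int × Int × List String × String)) (out : List (Int × Int × List String × String)) : Prop := out = filter_empty_ranges_py_alt content ranges
instance (content : String) (ranges : List (Int × Int × List String × String)) (out : List (Int × Int × List String × String)) : Decidable (Spec_filter_empty_ranges_py content ranges out) := by unfold Spec_filter_empty_ranges_py; infer_instance

-- ===== CLAIM (what is proved, stated in full; the proofs are below) =====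
def Claim_equal_filter_empty_ranges_py : Prop := ∀ (content : String) (ranges : List (Int × Int × List String × String)), Dom_filter_empty_ranges_py content ranges → Spec_filter_empty_ranges_py content ranges (filter_empty_ranges_py content ranges)

-- ===== LEMMAS AND PROOFS =====

-- replace the end of the last element (what A's blank branch does to out[-1])
def pvPatchLast (e : Int) : List (Int × Int × List String × String) → List (Int × Int × List String × String)
  | [] => []
  | [(ps, _, ph, pt)] => [(ps, e, ph, pt)]
  | x :: y :: tl => x :: pvPatchLast e (y :: tl)

theorem pvPatchLast_eq (e : Int) (out : List (Int × Int × List String × String)) :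
    (match out.getLast? with
      | some (ps, _, ph, pt) => out.dropLast ++ [(ps, e, ph, pt)]
      | none => out) = pvPatchLast e out := by
  induction out with
  | nil => rfl
  | cons x tl ih =>
    obtain ⟨ps, pe, ph, pt⟩ := x
    cases tl with
    | nil => rfl
    | cons y tl' =>
      cases hy : (y :: tl').getLast? with
      | none => simp at hy
      | some z =>
        obtain ⟨zs, ze, zh, zt⟩ := z
        rw [hy] at ih
        simp only [List.getLast?_cons_cons, hy, pvPatchLast, ← ih, List.dropLast_cons₂,
          List.cons_append]

theorem pvPatchLast_cons (e : Int) (a : Int × Int × List String × String)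
    (m : List (Int × Int × List String × String)) (hm : m ≠ []) :
    pvPatchLast e (a :: m) = a :: pvPatchLast e m := by
  obtain ⟨ps, pe, ph, pt⟩ := a
  cases m with
  | nil => exact absurd rfl hm
  | cons y tl => rfl

-- how pvTakeBlanks reacts to one element appended at the end
theorem pvTakeBlanks_append (e : Int) (tl : List ((Int × Int × List String × String) × Bool))
    (x : (Int × Int × List String × String) × Bool) :
    pvTakeBlanks e (tl ++ [x]) =
      if (pvTakeBlanks e tl).2 = [] then
        (if x.2 then (x.1.2.1, []) else ((pvTakeBlanks e tl).1, [x]))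
      else ((pvTakeBlanks e tl).1, (pvTakeBlanks e tl).2 ++ [x]) := by
  induction tl generalizing e with
  | nil =>
    obtain ⟨r, b⟩ := x
    by_cases hb : b = true <;> simp [pvTakeBlanks, hb]
  | cons y tl ih =>
    obtain ⟨r, b⟩ := y
    by_cases hb : b = true <;> simp [pvTakeBlanks, hb, ih]

-- the rest returned by pvTakeBlanks starts with a content-tagged element (if nonempty)
theorem pvTakeBlanks_head (e : Int) (l : List ((Int × Int × List String × String) × Bool)) :
    (pvTakeBlanks e l).2 = [] ∨
      ∃ r rest, (pvTakeBlanks e l).2 = (r, false) :: rest := by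
  induction l generalizing e with
  | nil => left; rfl
  | cons y tl ih =>
    obtain ⟨r, b⟩ := y
    by_cases hb : b = true
    · simpa [pvTakeBlanks, hb] using ih r.2.1
    · right
      refine ⟨r, tl, ?_⟩
      simp [pvTakeBlanks, hb]

-- appending a blank-tagged range patches the last emitted range's end
theorem pvEmit_append_blank (s e : Int) (hh : List String) (tt : String)
    (l : List ((Int × Int × List String × String) × Bool)) :
    pvEmit (l ++ [((s, e, hh, tt), true)]) = pvPatchLast e (pvEmit l) := by
  induction hn : l.length using Nat.strong_induction_on generalizing l with
  | _ n ih =>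
    cases l with
    | nil => simp [pvEmit, pvPatchLast]
    | cons x tl =>
      obtain ⟨⟨s0, e0, h0, t0⟩, b0⟩ := x
      subst hn
      by_cases hb : b0 = true
      · simpa [pvEmit, hb] using ih tl.length (by simp) tl rfl
      · simp only [List.cons_append, pvEmit, hb]
        rw [pvTakeBlanks_append]
        rcases pvTakeBlanks_head e0 tl with hnil | ⟨r, rest, hcons⟩
        · simp only [hnil]
          simp [pvEmit, pvPatchLast]
        · have hne : (pvTakeBlanks e0 tl).2 ≠ [] := by simp [hcons]
          have hlen : (pvTakeBlanks e0 tl).2.length < tl.length + 1 :=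
            Nat.lt_succ_of_le (pvTakeBlanks_len e0 tl)
          have hemit : pvEmit (pvTakeBlanks e0 tl).2 ≠ [] := by
            rw [hcons]
            obtain ⟨rs, re, rh, rt⟩ := r
            simp [pvEmit]
          simp only [if_neg hne, Bool.false_eq_true, if_false]
          rw [ih _ hlen _ rfl, pvPatchLast_cons _ _ _ hemit]

-- appending a content-tagged range appends it to the result
theorem pvEmit_append_content (s e : Int) (hh : List String) (tt : String)
    (l : List ((Int × Int × List String × String) × Bool)) :
    pvEmit (l ++ [((s, e, hh, tt), false)]) = pvEmit l ++ [(s, e, hh, tt)] := by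
  induction hn : l.length using Nat.strong_induction_on generalizing l with
  | _ n ih =>
    cases l with
    | nil => simp [pvEmit, pvTakeBlanks]
    | cons x tl =>
      obtain ⟨⟨s0, e0, h0, t0⟩, b0⟩ := x
      subst hn
      by_cases hb : b0 = true
      · simpa [pvEmit, hb] using ih tl.length (by simp) tl rfl
      · simp only [List.cons_append, pvEmit, hb]
        rw [pvTakeBlanks_append]
        rcases pvTakeBlanks_head e0 tl with hnil | ⟨r, rest, hcons⟩
        · simp only [hnil]
          simp [pvEmit, pvTakeBlanks]
        · have hne : (pvTakeBlanks e0 tl).2 ≠ [] := by simp [hcons]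
          have hlen : (pvTakeBlanks e0 tl).2.length < tl.length + 1 :=
            Nat.lt_succ_of_le (pvTakeBlanks_len e0 tl)
          simp only [if_neg hne, Bool.false_eq_true, if_false]
          rw [ih _ hlen _ rfl, List.cons_append]

theorem pvTagFilter_append (content : String) (rs : List (Int × Int × List String × String))
    (r : Int × Int × List String × String) :
    pvTagFilter content (rs ++ [r]) =
      pvTagFilter content rs ++
        (if r.2.1 ≤ r.1 then [] else [(r, pvBlank content r.1 r.2.1)]) := by
  simp only [pvTagFilter, List.filterMap_append, List.filterMap_cons, List.filterMap_nil]
  split_ifs <;> rfl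

theorem pvA_eq_emit (content : String) (rs : List (Int × Int × List String × String)) :
    rs.foldl (pvStepA content) [] = pvEmit (pvTagFilter content rs) := by
  induction rs using List.reverseRecOn with
  | nil => simp [pvTagFilter, pvEmit]
  | append_singleton rs r ih =>
    obtain ⟨s, e, h, t⟩ := r
    rw [List.foldl_append, List.foldl_cons, List.foldl_nil, pvTagFilter_append]
    by_cases hs : e ≤ s
    · simpa [pvStepA, hs] using ih
    · by_cases hb : pvBlank content s e = true
      · simp only [pvStepA, hs, if_false, hb, if_true]
        rw [pvPatchLast_eq]
        rw [pvEmit_append_blank, ih]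
      · simp only [pvStepA, hs, if_false, hb, Bool.false_eq_true]
        rw [pvEmit_append_content, ih]

-- ===== VERDICT (by name: the statement is the Claim_ definition above) =====
theorem filter_empty_ranges_py_spec : Claim_equal_filter_empty_ranges_py := by
  intro content ranges _
  show filter_empty_ranges_py content ranges = filter_empty_ranges_py_alt content ranges
  unfold filter_empty_ranges_py filter_empty_ranges_py_alt
  exact pvA_eq_emit content ranges
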